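-- pv_equiv track=rewrite | github.com/MoatasimB/LC-solutions | 1807-evaluate-the-bracket-pairs-of-a-string/1807. Evaluate the Bracket Pairs of a String.py | evaluate
-- ===== SOURCE A (Python) =====
-- from typing import List
--
-- def evaluate(s: str, knowledge: List[List[str]]) -> str:
--
--     mpp = {}
--
--     for key, val in knowledge:
--         mpp[key] = val
--
--     stack = []
--
--     i = 0
--
--     while i < len(s):
--         if s[i] == "(":
--             i += 1
--             curr = []
--             while i < len(s) and s[i] != ")":
--                 curr.append(s[i])
--                 i += 1
--             word = "".join(curr)
--
--             if word in mpp: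
--                 stack.append(mpp[word])
--             else:
--                 stack.append("?")
--
--             i += 1
--         else:
--             stack.append(s[i])
--             i += 1
--
--
--     return "".join(stack)
-- ===== SOURCE B (Python) =====
-- def evaluate(s, knowledge):
--     mpp = dict(knowledge)
--     out = []
--     i = 0
--     while True:
--         j = s.find('(', i)
--         if j == -1:
--             out.append(s[i:])
--             break
--         out.append(s[i:j])
--         k = s.find(')', j + 1)
--         if k == -1:
--             out.append(mpp.get(s[j + 1:], '?'))
--             break
--         out.append(mpp.get(s[j + 1:k], '?'))
--         i = k + 1
--     return ''.join(out)
-- ===== Notes on version B (the rewrite author's own statement) =====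
-- stated objective: alternative
-- what changed: B replaces A's character-by-character while-loop with an explicit stack of pieces by find-based chunking: it jumps from '(' to '(' with str.find, slices the word up to the next ')', and emits whole substring chunks.
import Mathlib
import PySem

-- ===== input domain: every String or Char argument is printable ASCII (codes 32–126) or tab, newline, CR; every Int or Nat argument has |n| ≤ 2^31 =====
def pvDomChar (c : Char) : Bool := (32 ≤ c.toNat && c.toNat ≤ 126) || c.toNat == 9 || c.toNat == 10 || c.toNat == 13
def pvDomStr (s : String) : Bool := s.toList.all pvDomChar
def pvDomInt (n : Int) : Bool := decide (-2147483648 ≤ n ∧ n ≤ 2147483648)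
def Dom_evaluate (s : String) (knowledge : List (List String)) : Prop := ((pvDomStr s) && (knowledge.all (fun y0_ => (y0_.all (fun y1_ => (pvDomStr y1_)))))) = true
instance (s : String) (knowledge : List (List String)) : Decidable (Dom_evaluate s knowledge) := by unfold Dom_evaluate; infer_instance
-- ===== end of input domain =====

-- B replaces A's character-by-character scan (an explicit stack of one-char pieces and
-- looked-up values) with find-based chunking: jump to the next '(', slice the word up to
-- the next ')', emit whole substring chunks.  Same O(n) cost; return values proved equal.

-- ===== PORT A =====
-- A's inner while loop: collect chars up to the first ')' (curr); rest is what follows the ')'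
def pvReadWordA : List Char → List Char × List Char
  | [] => ([], [])
  | c :: t =>
    if c = ')' then ([], t)
    else
      let p := pvReadWordA t
      (c :: p.1, p.2)

theorem pvReadWordA_snd_le (t : List Char) : (pvReadWordA t).2.length ≤ t.length := by
  induction t with
  | nil => simp [pvReadWordA]
  | cons c t ih =>
    simp only [pvReadWordA]
    split
    · simp
    · simpa using Nat.le_succ_of_le ih

-- A's outer while loop, producing the stack of appended pieces
def pvRunA (mpp : PySem.Dict String String) : List Char → List String
  | [] => []
  | c :: t =>
    if c = '(' then
      let p := pvReadWordA t
      (mpp.getD (String.ofList p.1) "?") :: pvRunA mpp p.2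
    else
      String.ofList [c] :: pvRunA mpp t
termination_by cs => cs.length
decreasing_by
  · simpa using Nat.lt_succ_of_le (pvReadWordA_snd_le t)
  · simp

def evaluate (s : String) (knowledge : List (List String)) : String :=
  let mpp : PySem.Dict String String :=
    knowledge.foldl (fun d row =>
      match row with
      | [key, val] => d.insert key val
      | _ => d           -- unreachable under Pre_ (Python raises on such a row)
      ) PySem.Dict.empty
  PySem.Str.join "" (pvRunA mpp s.toList)

-- ===== PORT B =====
-- one round of B's loop: s[i:j] (chunk before the next '('), the word up to the next ')',
-- then continue after that ')'; the two find(…) == -1 exits are the [] branches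
def pvRunB (mpp : PySem.Dict String String) : List Char → List String
  | cs =>
    match h : cs.dropWhile (· ≠ '(') with
    | [] => [String.ofList (cs.takeWhile (· ≠ '('))]
    | x :: t =>
      match h2 : t.dropWhile (· ≠ ')') with
      | [] => [String.ofList (cs.takeWhile (· ≠ '(')),
               mpp.getD (String.ofList (t.takeWhile (· ≠ ')'))) "?"]
      | y :: r => String.ofList (cs.takeWhile (· ≠ '('))
                    :: mpp.getD (String.ofList (t.takeWhile (· ≠ ')'))) "?" :: pvRunB mpp r
termination_by cs => cs.length
decreasing_by
  have h1 : (cs.dropWhile (· ≠ '(')).length ≤ cs.length := cs.length_dropWhile_le _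
  have h3 : (t.dropWhile (· ≠ ')')).length ≤ t.length := t.length_dropWhile_le _
  rw [h] at h1; rw [h2] at h3
  simp at h1 h3
  show r.length < cs.length
  omega

def evaluate_alt (s : String) (knowledge : List (List String)) : String :=
  let mpp : PySem.Dict String String :=
    -- dict(knowledge): each row is a [key, value] pair; rows of other lengths
    -- make Python raise and are outside Pre_
    PySem.Dict.ofList (knowledge.map (fun row => (row.headD "", row.tail.headD "")))
  PySem.Str.join "" (pvRunB mpp s.toList)

-- ===== PRECONDITION & SPEC =====
-- Pre_ excludes knowledge rows that are not [key, value] pairs: both A ('key, val = row')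
-- and B ('dict(knowledge)') raise ValueError there, so nothing is claimed on such inputs.
def Pre_evaluate (s : String) (knowledge : List (List String)) : Prop :=
  ∀ row ∈ knowledge, row.length = 2
instance (s : String) (knowledge : List (List String)) : Decidable (Pre_evaluate s knowledge) := by
  unfold Pre_evaluate; infer_instance

def pvWitness_evaluate : String × List (List String) := ("x(a)y(b)(c", [["a", "uv"], ["b", ""]])

def Spec_evaluate (s : String) (knowledge : List (List String)) (out : String) : Prop := out = evaluate_alt s knowledge
instance (s : String) (knowledge : List (List String)) (out : String) : Decidable (Spec_evaluate s knowledge out) := by unfold Spec_evaluate; infer_instance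

-- ===== CLAIM (what is proved, stated in full; the proofs are below) =====
def Claim_equal_evaluate : Prop := ∀ (s : String) (knowledge : List (List String)), Dom_evaluate s knowledge → Pre_evaluate s knowledge → Spec_evaluate s knowledge (evaluate s knowledge)

-- ===== LEMMAS AND PROOFS =====

theorem pvRunA_nil (mpp : PySem.Dict String String) : pvRunA mpp [] = [] := by
  rw [pvRunA.eq_def]

-- A's inner loop is take/drop up to the first ')'
theorem pvReadWordA_eq (t : List Char) :
    pvReadWordA t = (t.takeWhile (· ≠ ')'), (t.dropWhile (· ≠ ')')).tail) := by
  induction t with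
  | nil => simp [pvReadWordA]
  | cons c t ih =>
    by_cases hc : c = ')'
    · simp [pvReadWordA, hc, List.takeWhile, List.dropWhile]
    · simp [pvReadWordA, hc, List.takeWhile, List.dropWhile, ih]

theorem pvRunA_cons (mpp : PySem.Dict String String) (c : Char) (t : List Char) :
    pvRunA mpp (c :: t) =
      if c = '(' then
        (mpp.getD (String.ofList (t.takeWhile (· ≠ ')'))) "?")
          :: pvRunA mpp ((t.dropWhile (· ≠ ')')).tail)
      else String.ofList [c] :: pvRunA mpp t := by
  rw [pvRunA.eq_def]
  simp [pvReadWordA_eq]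

theorem pvRunB_nil (mpp : PySem.Dict String String) : pvRunB mpp [] = [""] := by
  rw [pvRunB.eq_def]; rfl

-- the two loops produce the same concatenation of pieces
theorem pvRun_flatten_eq (mpp : PySem.Dict String String) (cs : List Char) :
    ((pvRunA mpp cs).map String.toList).flatten
      = ((pvRunB mpp cs).map String.toList).flatten := by
  induction hn : cs.length using Nat.strong_induction_on generalizing cs with
  | _ n ih =>
  cases cs with
  | nil => simp [pvRunA_nil, pvRunB_nil]
  | cons c t =>
    simp only [List.length_cons] at hn
    by_cases hc : c = '('
    · subst hc
      have hdw : List.dropWhile (fun x => decide (x ≠ '(')) ('(' :: t) = '(' :: t := by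
        simp [List.dropWhile]
      rw [pvRunA_cons, if_pos rfl, pvRunB.eq_def]
      dsimp only
      split
      · rename_i h1
        rw [hdw] at h1
        exact absurd h1 (by simp)
      · rename_i x t1 h1
        rw [hdw] at h1
        injection h1 with hx ht
        subst hx
        subst ht
        split
        · rename_i h2
          have h2' : (List.dropWhile (fun x => decide (x ≠ ')')) t).tail = ([] : List Char) := by
            rw [h2]; rfl
          rw [h2', pvRunA_nil]
          simp [List.takeWhile]
        · rename_i y r h2
          have h2' : (List.dropWhile (fun x => decide (x ≠ ')')) t).tail = r := by
            rw [h2]; rfl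
          have hr : r.length < n := by
            have := List.length_dropWhile_le (fun x => decide (x ≠ ')')) t
            rw [h2] at this; simp at this; omega
          rw [h2']
          simp [List.takeWhile, ih r.length hr r rfl]
    · have htw : List.takeWhile (fun x => decide (x ≠ '(')) (c :: t)
          = c :: List.takeWhile (fun x => decide (x ≠ '(')) t := by
        simp [List.takeWhile, hc]
      have hdw : List.dropWhile (fun x => decide (x ≠ '(')) (c :: t)
          = List.dropWhile (fun x => decide (x ≠ '(')) t := by
        simp [List.dropWhile, hc]
      have hstep : ((pvRunB mpp (c :: t)).map String.toList).flatten
          = c :: ((pvRunB mpp t).map String.toList).flatten := by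
        rw [pvRunB.eq_def, pvRunB.eq_def]
        dsimp only
        rw [htw, hdw]
        split
        · simp
        · split <;> simp
      rw [pvRunA_cons, if_neg hc]
      have htlt : t.length < n := by omega
      simp [hstep, ih t.length htlt t rfl]

theorem pv_intercalate_nil (l : List (List Char)) : [].intercalate l = l.flatten := by
  simp [List.intercalate]
  induction l with
  | nil => rfl
  | cons a t ih =>
    cases t with
    | nil => rfl
    | cons b t2 => simpa [List.intersperse] using ih

theorem pv_join_empty (l : List String) :
    PySem.Str.join "" l = String.ofList ((l.map String.toList).flatten) := by
  simp [PySem.Str.join, PySem.Chars.join, pv_intercalate_nil]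

-- A's dict-building loop and B's dict(knowledge) build the same Dict on well-formed rows
theorem pv_fold_eq : ∀ (l : List (List String)), (∀ row ∈ l, row.length = 2) →
    ∀ (d : PySem.Dict String String),
    l.foldl (fun d row =>
      match row with
      | [key, val] => d.insert key val
      | _ => d) d
    = (l.map (fun row => (row.headD "", row.tail.headD ""))).foldl
        (fun d p => d.insert p.1 p.2) d
  | [], _, d => rfl
  | row :: rest, h, d => by
    obtain ⟨k, v, rfl⟩ : ∃ k v, row = [k, v] := by
      have h2 := h row (by simp)
      match row, h2 with
      | [k, v], _ => exact ⟨k, v, rfl⟩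
    simp only [List.map_cons, List.foldl_cons]
    exact pv_fold_eq rest (fun r hr => h r (List.mem_cons_of_mem _ hr)) _

theorem pv_mpp_eq (knowledge : List (List String)) (h : ∀ row ∈ knowledge, row.length = 2) :
    knowledge.foldl (fun d row =>
      match row with
      | [key, val] => d.insert key val
      | _ => d) PySem.Dict.empty
    = PySem.Dict.ofList (knowledge.map (fun row => (row.headD "", row.tail.headD ""))) := by
  rw [PySem.Dict.ofList]
  exact pv_fold_eq knowledge h _

-- ===== VERDICT (by name: the statement is the Claim_ definition above) =====
theorem evaluate_spec : Claim_equal_evaluate := by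
  intro s knowledge _hdom hpre
  unfold Spec_evaluate evaluate evaluate_alt
  rw [pv_mpp_eq knowledge hpre]
  rw [pv_join_empty, pv_join_empty, pvRun_flatten_eq]
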